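-- pv_equiv track=rewrite | github.com/fratelemk/blenderkit | farm/src/utils.py | split_frames
-- ===== SOURCE A (Python) =====
-- def split_frames(start, end, n_hosts):
--     total_frames = end - start + 1
--     chunk_size = total_frames // n_hosts
--     remainder = total_frames % n_hosts
--
--     frame_chunks = []
--     current_start = start
--
--     for _ in range(n_hosts):
--         current_end = current_start + chunk_size - 1
--
--         if remainder > 0:
--             current_end += 1
--             remainder -= 1
--
--         frame_chunks.append((current_start, current_end))
--         current_start = current_end + 1
--
--     return frame_chunks
-- ===== SOURCE B (Python) =====
-- def split_frames(start, end, n_hosts):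
--     total_frames = end - start + 1
--     chunk_size = total_frames // n_hosts
--     remainder = total_frames % n_hosts
--     return [
--         (start + i * chunk_size + min(i, remainder),
--          start + (i + 1) * chunk_size + min(i + 1, remainder) - 1)
--         for i in range(n_hosts)
--     ]
-- ===== Notes on version B (the rewrite author's own statement) =====
-- stated objective: alternative
-- what changed: Replaces the stateful loop that carries current_start and a decrementing remainder forward with a per-index closed form: chunk i is computed independently as start + i*chunk_size + min(i, remainder) .. start + (i+1)*chunk_size + min(i+1, remainder) - 1.
import Mathlib
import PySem

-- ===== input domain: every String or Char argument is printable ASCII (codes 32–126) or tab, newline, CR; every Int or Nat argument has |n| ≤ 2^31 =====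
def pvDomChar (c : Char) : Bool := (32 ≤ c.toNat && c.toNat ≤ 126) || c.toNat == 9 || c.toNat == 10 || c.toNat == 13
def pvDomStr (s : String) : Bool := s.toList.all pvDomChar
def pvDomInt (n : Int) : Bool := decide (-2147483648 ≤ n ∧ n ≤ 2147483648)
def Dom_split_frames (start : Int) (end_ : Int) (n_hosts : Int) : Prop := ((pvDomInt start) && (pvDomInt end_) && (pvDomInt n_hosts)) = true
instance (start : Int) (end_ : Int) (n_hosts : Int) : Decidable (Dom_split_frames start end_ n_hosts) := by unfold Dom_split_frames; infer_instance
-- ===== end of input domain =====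

-- B replaces A's stateful loop (mutating current_start and a decrementing remainder) with a
-- per-index closed form for each chunk; same cost, different decomposition ("alternative").


-- ===== PORT A =====
-- one loop iteration: appends (current_start, current_end), advances current_start, decrements remainder
def pvStepA (chunk_size : Int) (s : List (Int × Int) × Int × Int) : List (Int × Int) × Int × Int :=
  let current_start := s.2.1
  let remainder := s.2.2
  let current_end := current_start + chunk_size - 1
  let current_end := if remainder > 0 then current_end + 1 else current_end
  let remainder := if remainder > 0 then remainder - 1 else remainder
  (s.1 ++ [(current_start, current_end)], (current_end + 1, remainder))

def split_frames (start : Int) (end_ : Int) (n_hosts : Int) : List (Int × Int) :=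
  let total_frames := end_ - start + 1
  let chunk_size := PySem.Int.floordiv total_frames n_hosts
  let remainder := PySem.Int.mod total_frames n_hosts
  ((PySem.List.pyRange 0 n_hosts 1).foldl (fun s _ => pvStepA chunk_size s)
    (([] : List (Int × Int)), (start, remainder))).1

-- ===== PORT B =====
-- the tuple of Source B's comprehension, for index i
def pvChunk (chunk_size start remainder i : Int) : Int × Int :=
  (start + i * chunk_size + min i remainder,
   start + (i + 1) * chunk_size + min (i + 1) remainder - 1)

def split_frames_alt (start : Int) (end_ : Int) (n_hosts : Int) : List (Int × Int) :=
  let total_frames := end_ - start + 1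
  let chunk_size := PySem.Int.floordiv total_frames n_hosts
  let remainder := PySem.Int.mod total_frames n_hosts
  (PySem.List.pyRange 0 n_hosts 1).map (fun i => pvChunk chunk_size start remainder i)

-- ===== PRECONDITION & SPEC =====
-- Pre_ excludes n_hosts = 0, where A (and B) raise ZeroDivisionError.
def Pre_split_frames (start : Int) (end_ : Int) (n_hosts : Int) : Prop := n_hosts ≠ 0
instance (start : Int) (end_ : Int) (n_hosts : Int) : Decidable (Pre_split_frames start end_ n_hosts) := by unfold Pre_split_frames; infer_instance
def pvWitness_split_frames : Int × Int × Int := (1, 10, 3)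

def Spec_split_frames (start : Int) (end_ : Int) (n_hosts : Int) (out : List (Int × Int)) : Prop := out = split_frames_alt start end_ n_hosts
instance (start : Int) (end_ : Int) (n_hosts : Int) (out : List (Int × Int)) : Decidable (Spec_split_frames start end_ n_hosts out) := by unfold Spec_split_frames; infer_instance

-- ===== CLAIM (what is proved, stated in full; the proofs are below) =====
def Claim_equal_split_frames : Prop := ∀ (start : Int) (end_ : Int) (n_hosts : Int), Dom_split_frames start end_ n_hosts → Pre_split_frames start end_ n_hosts → Spec_split_frames start end_ n_hosts (split_frames start end_ n_hosts)

-- ===== LEMMAS AND PROOFS =====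

-- Loop invariant: A's fold over any index list appends exactly B's closed-form chunks.
lemma pv_loop (cs : Int) (l : List Int) : ∀ (acc : List (Int × Int)) (cur rem : Int), 0 ≤ rem →
    ((l.foldl (fun s _ => pvStepA cs s) (acc, (cur, rem))).1
      = acc ++ (List.range l.length).map (fun (k : Nat) => pvChunk cs cur rem (k : Int))) := by
  induction l with
  | nil => intro acc cur rem _; simp
  | cons x l ih =>
    intro acc cur rem hrem
    by_cases h : rem > 0
    · have step : pvStepA cs (acc, (cur, rem)) = (acc ++ [(cur, cur + cs)], (cur + cs + 1, rem - 1)) := by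
        have e : cur + cs - 1 + 1 = cur + cs := by ring
        simp only [pvStepA, if_pos h, e]
      rw [List.foldl_cons, step, ih _ _ _ (by omega)]
      rw [List.length_cons, List.range_succ_eq_map, List.map_cons, List.map_map]
      have h0 : pvChunk cs cur rem ((0 : ℕ) : Int) = (cur, cur + cs) := by
        have h1 : min (0 : Int) rem = 0 := by omega
        have h2 : min (0 + 1 : Int) rem = 1 := by omega
        simp only [pvChunk, Nat.cast_zero, h1, h2, Prod.mk.injEq]
        constructor <;> ring
      have hmap : ∀ k : ℕ, pvChunk cs (cur + cs + 1) (rem - 1) (k : Int)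
          = pvChunk cs cur rem ((Nat.succ k : ℕ) : Int) := by
        intro k
        simp only [pvChunk, Prod.mk.injEq]
        push_cast
        have e1 : ((k : Int) + 1) * cs = (k : Int) * cs + cs := by ring
        have e2 : ((k : Int) + 1 + 1) * cs = ((k : Int) + 1) * cs + cs := by ring
        have m1 : min ((k : Int) + 1) rem = min (k : Int) (rem - 1) + 1 := by omega
        have m2 : min ((k : Int) + 1 + 1) rem = min ((k : Int) + 1) (rem - 1) + 1 := by omega
        constructor
        · rw [e1, m1]; ring
        · rw [e2, m2]; ring
      simp only [Function.comp_def]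
      rw [List.map_congr_left (fun k _ => hmap k), h0]
      simp
    · have hz : rem = 0 := by omega
      subst hz
      have step : pvStepA cs (acc, (cur, 0)) = (acc ++ [(cur, cur + cs - 1)], (cur + cs, 0)) := by
        have e : cur + cs - 1 + 1 = cur + cs := by ring
        simp only [pvStepA, lt_irrefl, if_false, e]
      rw [List.foldl_cons, step, ih _ _ _ le_rfl]
      rw [List.length_cons, List.range_succ_eq_map, List.map_cons, List.map_map]
      have h0 : pvChunk cs cur 0 ((0 : ℕ) : Int) = (cur, cur + cs - 1) := by
        simp only [pvChunk, Nat.cast_zero, Prod.mk.injEq]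
        constructor <;> simp
      have hmap : ∀ k : ℕ, pvChunk cs (cur + cs) 0 (k : Int)
          = pvChunk cs cur 0 ((Nat.succ k : ℕ) : Int) := by
        intro k
        simp only [pvChunk, Prod.mk.injEq]
        push_cast
        have m1 : min ((k : Int)) (0 : Int) = 0 := by omega
        have m2 : min ((k : Int) + 1) (0 : Int) = 0 := by omega
        have m3 : min ((k : Int) + 1 + 1) (0 : Int) = 0 := by omega
        rw [m1, m2, m3]
        constructor <;> ring
      simp only [Function.comp_def]
      rw [List.map_congr_left (fun k _ => hmap k), h0]
      simp

-- ===== VERDICT (by name: the statement is the Claim_ definition above) =====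
theorem split_frames_spec : Claim_equal_split_frames := by
  intro start end_ n_hosts _ hpre
  unfold Spec_split_frames split_frames split_frames_alt
  by_cases hn : n_hosts ≤ 0
  · rw [PySem.List.pyRange_one_eq_nil (by omega)]
    simp
  · push Not at hn
    have hrem : 0 ≤ PySem.Int.mod (end_ - start + 1) n_hosts := by
      rw [PySem.Int.mod_eq_emod_of_pos hn]
      exact Int.emod_nonneg _ (by omega)
    rw [pv_loop _ _ _ _ _ hrem]
    rw [PySem.List.pyRange_one, List.map_map]
    simp only [List.length_map, List.length_range, List.nil_append, Function.comp_def, zero_add]
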